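-- pv_equiv track=rewrite | github.com/sohyun215/algorithm | programmers/lv1/명예의_전당.py | solution
-- ===== SOURCE A (Python) =====
-- def solution(k, score):
--     answer = []
--     top_score = []
--     for s in score:
--         top_score.append(s)
--         if len(top_score) > k:
--             top_score.remove(min(top_score))
--         answer.append(min(top_score))
--     return answer
-- ===== SOURCE B (Python) =====
-- def solution(k, score):
--     # Maintain the k largest scores so far as an ascending sorted list:
--     # binary-search the insertion point, insert, drop the head when over size,
--     # and report the head (the current minimum of the hall of fame).
--     answer = []
--     top = []  # ascending sorted list of the k largest scores so far
--     for s in score: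
--         lo, hi = 0, len(top)
--         while lo < hi:
--             mid = (lo + hi) // 2
--             if top[mid] < s:
--                 lo = mid + 1
--             else:
--                 hi = mid
--         top.insert(lo, s)
--         if len(top) > k:
--             del top[0]
--         answer.append(top[0])
--     return answer
-- ===== Notes on version B (the rewrite author's own statement) =====
-- stated objective: faster
-- what changed: B keeps the k best scores as an ascending sorted window maintained by hand-written binary-search insertion and reports its head, instead of A's per-step min() scan plus remove() scan over the unordered window.
import Mathlib
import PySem

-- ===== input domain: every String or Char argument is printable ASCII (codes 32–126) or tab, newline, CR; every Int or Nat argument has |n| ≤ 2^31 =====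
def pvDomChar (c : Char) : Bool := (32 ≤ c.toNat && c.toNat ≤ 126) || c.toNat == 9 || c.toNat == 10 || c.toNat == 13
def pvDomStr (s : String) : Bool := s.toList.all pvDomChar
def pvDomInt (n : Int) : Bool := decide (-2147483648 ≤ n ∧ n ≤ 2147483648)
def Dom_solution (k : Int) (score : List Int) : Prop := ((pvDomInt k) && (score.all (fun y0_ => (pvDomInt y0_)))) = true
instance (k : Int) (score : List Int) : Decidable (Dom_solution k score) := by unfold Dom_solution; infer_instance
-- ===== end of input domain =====

-- B replaces A's per-step min()+remove() scans by a sorted window with binary-search insertion (faster).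

-- ===== PORT A =====
def solution (k : Int) (score : List Int) : List Int :=
  (score.foldl (fun (st : List Int × List Int) s =>
    let top0 := st.2 ++ [s]
    let top := if k < (top0.length : Int) then
        (match PySem.List.min? top0 (fun x => x) with
         | some m => (PySem.List.remove? top0 m).getD top0
         | none => top0)
      else top0
    (st.1 ++ [(PySem.List.min? top (fun x => x)).getD 0], top)) ([], [])).1

-- ===== PORT B =====
-- the hand-written while-loop binary search of Source B (bisect_left on top)
def bsearchLoop (top : List Int) (s : Int) (lo hi : Nat) : Nat :=
  if _h : lo < hi then
    let mid := (lo + hi) / 2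
    if PySem.List.pyGetD top (mid : Int) 0 < s then bsearchLoop top s (mid + 1) hi
    else bsearchLoop top s lo mid
  else lo
termination_by hi - lo
decreasing_by all_goals omega

def solution_alt (k : Int) (score : List Int) : List Int :=
  (score.foldl (fun (st : List Int × List Int) s =>
    let lo := bsearchLoop st.2 s 0 st.2.length
    let top0 := PySem.List.insert st.2 (lo : Int) s
    let top := if k < (top0.length : Int) then
        (match PySem.List.pop? top0 0 with
         | some r => r.2
         | none => top0)
      else top0
    (st.1 ++ [PySem.List.pyGetD top 0 0], top)) ([], [])).1

-- ===== PRECONDITION & SPEC =====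
-- Pre_ excludes only inputs where A raises: with k ≤ 0 and a nonempty score the window is
-- emptied each step and Python's min([]) raises ValueError (B's top[0] raises IndexError there).
def Pre_solution (k : Int) (score : List Int) : Prop := score = [] ∨ 1 ≤ k
instance (k : Int) (score : List Int) : Decidable (Pre_solution k score) := by unfold Pre_solution; infer_instance
def pvWitness_solution : Int × List Int := (2, [10, 20, 5])
def Spec_solution (k : Int) (score : List Int) (out : List Int) : Prop := out = solution_alt k score
instance (k : Int) (score : List Int) (out : List Int) : Decidable (Spec_solution k score out) := by unfold Spec_solution; infer_instance

-- ===== CLAIM (what is proved, stated in full; the proofs are below) =====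
def Claim_equal_solution : Prop := ∀ (k : Int) (score : List Int), Dom_solution k score → Pre_solution k score → Spec_solution k score (solution k score)

-- ===== LEMMAS AND PROOFS =====

-- the fold bodies of the two ports, named for the proofs (definitionally equal to the lambdas above)
def stepA (k : Int) (st : List Int × List Int) (s : Int) : List Int × List Int :=
  let top0 := st.2 ++ [s]
  let top := if k < (top0.length : Int) then
      (match PySem.List.min? top0 (fun x => x) with
       | some m => (PySem.List.remove? top0 m).getD top0
       | none => top0)
    else top0
  (st.1 ++ [(PySem.List.min? top (fun x => x)).getD 0], top)

def stepB (k : Int) (st : List Int × List Int) (s : Int) : List Int × List Int :=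
  let lo := bsearchLoop st.2 s 0 st.2.length
  let top0 := PySem.List.insert st.2 (lo : Int) s
  let top := if k < (top0.length : Int) then
      (match PySem.List.pop? top0 0 with
       | some r => r.2
       | none => top0)
    else top0
  (st.1 ++ [PySem.List.pyGetD top 0 0], top)

lemma solution_eq_foldl (k : Int) (score : List Int) :
    solution k score = (score.foldl (stepA k) ([], [])).1 := rfl

lemma solution_alt_eq_foldl (k : Int) (score : List Int) :
    solution_alt k score = (score.foldl (stepB k) ([], [])).1 := rfl

lemma sorted_getD_le (l : List Int) (h : l.Pairwise (· ≤ ·)) (i j : Nat)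
    (hij : i ≤ j) (hj : j < l.length) : l.getD i 0 ≤ l.getD j 0 := by
  rcases Nat.lt_or_eq_of_le hij with hlt | rfl
  · rw [List.getD_eq_getElem l 0 (by omega), List.getD_eq_getElem l 0 hj]
    exact List.pairwise_iff_getElem.mp h i j (by omega) hj hlt
  · rfl

-- correctness of Source B's binary search: all indices below the result hold values < s, all from it on hold values ≥ s
lemma bsearch_spec (top : List Int) (s : Int) (hsorted : top.Pairwise (· ≤ ·)) :
    ∀ (n lo hi : Nat), hi - lo ≤ n → hi ≤ top.length → lo ≤ hi →
    (∀ j, j < lo → top.getD j 0 < s) →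
    (∀ j, hi ≤ j → j < top.length → s ≤ top.getD j 0) →
    bsearchLoop top s lo hi ≤ top.length ∧
    (∀ j, j < bsearchLoop top s lo hi → top.getD j 0 < s) ∧
    (∀ j, bsearchLoop top s lo hi ≤ j → j < top.length → s ≤ top.getD j 0) := by
  intro n
  induction n with
  | zero =>
    intro lo hi hfuel hhi hlo hb ha
    have heq : lo = hi := by omega
    subst heq
    rw [bsearchLoop, dif_neg (by omega)]
    exact ⟨by omega, hb, ha⟩
  | succ n ih =>
    intro lo hi hfuel hhi hlo hb ha
    rw [bsearchLoop]
    by_cases hlh : lo < hi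
    · rw [dif_pos hlh]
      have hget : PySem.List.pyGetD top (((lo + hi) / 2 : Nat) : Int) 0 = top.getD ((lo + hi) / 2) 0 :=
        PySem.List.pyGetD_natCast top ((lo + hi) / 2) 0
      simp only [hget]
      by_cases hcmp : top.getD ((lo + hi) / 2) 0 < s
      · rw [if_pos hcmp]
        refine ih ((lo + hi) / 2 + 1) hi (by omega) hhi (by omega) ?_ ha
        intro j hj
        exact lt_of_le_of_lt (sorted_getD_le top hsorted j ((lo + hi) / 2) (by omega) (by omega)) hcmp
      · rw [if_neg hcmp]
        refine ih lo ((lo + hi) / 2) (by omega) (by omega) (by omega) hb ?_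
        intro j hj hjl
        exact le_trans (not_lt.mp hcmp) (sorted_getD_le top hsorted ((lo + hi) / 2) j hj hjl)
    · rw [dif_neg hlh]
      have heq : lo = hi := by omega
      subst heq
      exact ⟨by omega, hb, ha⟩

-- inserting s at a bisect_left position keeps the window sorted and is a permutation of s :: top
lemma insert_at_sorted (top : List Int) (s : Int) (i : Nat) (hi : i ≤ top.length)
    (hb : ∀ j, j < i → top.getD j 0 < s)
    (ha : ∀ j, i ≤ j → j < top.length → s ≤ top.getD j 0)
    (hsorted : top.Pairwise (· ≤ ·)) :
    (top.take i ++ s :: top.drop i).Pairwise (· ≤ ·) ∧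
    (top.take i ++ s :: top.drop i).Perm (s :: top) := by
  have htake : ∀ a ∈ top.take i, a < s := by
    intro a hmem
    obtain ⟨j, hj, rfl⟩ := List.getElem_of_mem hmem
    have hj' : j < i := by simp at hj; omega
    have hjlen : j < top.length := by simp at hj; omega
    rw [List.getElem_take]
    have := hb j hj'
    rwa [List.getD_eq_getElem top 0 hjlen] at this
  have hdrop : ∀ b ∈ top.drop i, s ≤ b := by
    intro b hmem
    obtain ⟨j, hj, rfl⟩ := List.getElem_of_mem hmem
    have hjlen : i + j < top.length := by simp at hj; omega
    rw [List.getElem_drop]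
    have := ha (i + j) (by omega) hjlen
    rwa [List.getD_eq_getElem top 0 hjlen] at this
  constructor
  · rw [List.pairwise_append]
    refine ⟨hsorted.sublist (List.take_sublist i top), ?_, ?_⟩
    · rw [List.pairwise_cons]
      exact ⟨hdrop, hsorted.sublist (List.drop_sublist i top)⟩
    · intro a hma b hmb
      rcases List.mem_cons.mp hmb with rfl | hmb'
      · exact le_of_lt (htake a hma)
      · exact le_trans (le_of_lt (htake a hma)) (hdrop b hmb')
  · calc (top.take i ++ s :: top.drop i).Perm (s :: (top.take i ++ top.drop i)) := List.perm_middle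
      _ = (s :: top) := by rw [List.take_append_drop]

-- Python's min of any permutation of a sorted nonempty list is the head of the sorted list
lemma min?_eq_head (A : List Int) (b : Int) (t : List Int) (h : A.Perm (b :: t))
    (hs : (b :: t).Pairwise (· ≤ ·)) : PySem.List.min? A (fun x => x) = some b := by
  have hne : A ≠ [] := by
    intro hA; subst hA; exact absurd h.length_eq (by simp)
  obtain ⟨m, hm⟩ : ∃ m, PySem.List.min? A (fun x => x) = some m := by
    cases hmm : PySem.List.min? A (fun x => x) with
    | none => exact absurd ((PySem.List.min?_eq_none_iff A (fun x => x)).mp hmm) hne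
    | some m => exact ⟨m, rfl⟩
  have hmem : m ∈ A := PySem.List.min?_mem hm
  have hmin : ∀ y ∈ A, m ≤ y := PySem.List.min?_isMin hm
  have hble : m ≤ b := hmin b (h.mem_iff.mpr (List.mem_cons_self))
  have hbm : b ≤ m := by
    rcases List.mem_cons.mp (h.mem_iff.mp hmem) with rfl | hmt
    · exact le_refl _
    · exact (List.pairwise_cons.mp hs).1 m hmt
  rw [hm, le_antisymm hble hbm]

-- one loop iteration: answers appended agree, windows stay permutations, B's window stays sorted
lemma step_ok (k : Int) (hk : 1 ≤ k) (s : Int) (stA stB : List Int × List Int)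
    (hans : stA.1 = stB.1) (hperm : stA.2.Perm stB.2) (hs : stB.2.Pairwise (· ≤ ·)) :
    (stepA k stA s).1 = (stepB k stB s).1 ∧
    (stepA k stA s).2.Perm (stepB k stB s).2 ∧
    (stepB k stB s).2.Pairwise (· ≤ ·) := by
  obtain ⟨aA, tA⟩ := stA
  obtain ⟨aB, tB⟩ := stB
  simp only at hans hperm hs
  subst hans
  obtain ⟨hlole, hbelow, habove⟩ := bsearch_spec tB s hs (tB.length) 0 tB.length (by omega)
    (le_refl _) (by omega) (by omega) (fun j h1 h2 => absurd h1 (by omega))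
  have hins : PySem.List.insert tB ((bsearchLoop tB s 0 tB.length : Nat) : Int) s =
      tB.take (bsearchLoop tB s 0 tB.length) ++ s :: tB.drop (bsearchLoop tB s 0 tB.length) :=
    PySem.List.insert_natCast tB _ s hlole
  obtain ⟨hsorted0, hperm0⟩ := insert_at_sorted tB s _ hlole hbelow habove hs
  have hpermAB : (tA ++ [s]).Perm
      (tB.take (bsearchLoop tB s 0 tB.length) ++ s :: tB.drop (bsearchLoop tB s 0 tB.length)) :=
    (List.perm_append_singleton s tA).trans ((hperm.cons s).trans hperm0.symm)
  have hlenB : (tB.take (bsearchLoop tB s 0 tB.length) ++ s ::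
      tB.drop (bsearchLoop tB s 0 tB.length)).length = tB.length + 1 := by
    simp only [List.length_append, List.length_cons, List.length_take, List.length_drop]
    omega
  simp only [stepA, stepB]
  rw [hins, hpermAB.length_eq]
  generalize hgen : tB.take (bsearchLoop tB s 0 tB.length) ++ s ::
      tB.drop (bsearchLoop tB s 0 tB.length) = t0 at hsorted0 hpermAB hlenB ⊢
  obtain ⟨b, rest, rfl⟩ : ∃ b rest, t0 = b :: rest := by
    cases hc : t0 with
    | nil => rw [hc] at hlenB; simp at hlenB
    | cons b rest => exact ⟨b, rest, rfl⟩
  have hminA : PySem.List.min? (tA ++ [s]) (fun x => x) = some b :=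
    min?_eq_head _ b rest hpermAB hsorted0
  by_cases hbr : k < ((b :: rest).length : Int)
  · rw [if_pos hbr, if_pos hbr]
    rw [PySem.List.pop?_zero_cons b rest, hminA]
    have hbmem : b ∈ tA ++ [s] := PySem.List.min?_mem hminA
    simp only [PySem.List.remove?_eq_some_erase _ b hbmem, Option.getD_some]
    have hpermA' : ((tA ++ [s]).erase b).Perm rest := by
      have := hpermAB.erase b
      rwa [List.erase_cons_head] at this
    have hrest_sorted : rest.Pairwise (· ≤ ·) := hsorted0.of_cons
    obtain ⟨c, r2, rfl⟩ : ∃ c r2, rest = c :: r2 := by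
      have hrl : 1 ≤ rest.length := by
        simp only [List.length_cons] at hlenB
        simp only [List.length_cons] at hbr
        omega
      cases hc2 : rest with
      | nil => rw [hc2] at hrl; simp at hrl
      | cons c r2 => exact ⟨c, r2, rfl⟩
    have hminA2 : PySem.List.min? ((tA ++ [s]).erase b) (fun x => x) = some c :=
      min?_eq_head _ c r2 hpermA' hrest_sorted
    refine ⟨?_, hpermA', hrest_sorted⟩
    simp only [hminA2, Option.getD_some, PySem.List.pyGetD_zero_cons]
  · rw [if_neg hbr, if_neg hbr]
    refine ⟨?_, hpermAB, hsorted0⟩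
    simp only [hminA, Option.getD_some, PySem.List.pyGetD_zero_cons]

lemma fold_ok (k : Int) (hk : 1 ≤ k) :
    ∀ (score : List Int) (stA stB : List Int × List Int),
    stA.1 = stB.1 → stA.2.Perm stB.2 → stB.2.Pairwise (· ≤ ·) →
    (score.foldl (stepA k) stA).1 = (score.foldl (stepB k) stB).1 := by
  intro score
  induction score with
  | nil => intro stA stB h _ _; exact h
  | cons s rest ih =>
    intro stA stB hans hperm hs
    obtain ⟨h1, h2, h3⟩ := step_ok k hk s stA stB hans hperm hs
    exact ih (stepA k stA s) (stepB k stB s) h1 h2 h3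

-- ===== VERDICT (by name: the statement is the Claim_ definition above) =====
theorem solution_spec : Claim_equal_solution := by
  intro k score _hdom hpre
  unfold Spec_solution
  rcases hpre with rfl | hk
  · rfl
  · rw [solution_eq_foldl, solution_alt_eq_foldl]
    exact (fold_ok k hk score ([], []) ([], []) rfl (List.Perm.refl []) List.Pairwise.nil)
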